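-- pv_equiv track=rewrite | github.com/unixthat/beer_project | tests/bot_test/test_increment3_live.py | monotone
-- ===== SOURCE A (Python) =====
-- def monotone(seq):
--     if len(seq) <= 1:
--         return True
--     diffs = [b - a for a, b in zip(seq, seq[1:])]
--     sign = 0
--     for d in diffs:
--         if d == 0:
--             continue
--         if sign == 0:
--             sign = 1 if d > 0 else -1
--         elif sign * d < 0:
--             return False
--     return True
-- ===== SOURCE B (Python) =====
-- def monotone(seq):
--     pairs = list(zip(seq, seq[1:]))
--     return all(a <= b for a, b in pairs) or all(a >= b for a, b in pairs)
-- ===== Notes on version B (the rewrite author's own statement) =====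
-- stated objective: simpler
-- what changed: Replaces A's sign-state machine over a precomputed diffs list (with length guard and early return) with two independent direction checks (all non-decreasing or all non-increasing) over adjacent pairs, no guard and no state.
import Mathlib
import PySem

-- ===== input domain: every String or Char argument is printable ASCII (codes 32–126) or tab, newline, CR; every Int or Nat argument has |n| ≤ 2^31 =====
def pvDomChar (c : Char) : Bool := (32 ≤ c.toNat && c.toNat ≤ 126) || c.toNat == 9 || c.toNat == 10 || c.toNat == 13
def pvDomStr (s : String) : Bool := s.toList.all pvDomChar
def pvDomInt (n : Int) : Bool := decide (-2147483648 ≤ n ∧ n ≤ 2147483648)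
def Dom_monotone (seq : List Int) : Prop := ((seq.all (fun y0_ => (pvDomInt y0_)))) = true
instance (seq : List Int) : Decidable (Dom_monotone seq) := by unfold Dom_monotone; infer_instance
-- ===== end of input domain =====

-- B replaces A's sign-state machine over diffs with two independent direction checks over adjacent pairs (simpler decomposition, same cost).

-- ===== PORT A =====
-- the `for d in diffs` loop with its `sign` state and early `return False`
def monotoneLoop : Int → List Int → Bool
  | _, [] => true
  | sign, d :: rest =>
    if d == 0 then monotoneLoop sign rest
    else if sign == 0 then monotoneLoop (if d > 0 then 1 else -1) rest
    else if sign * d < 0 then false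
    else monotoneLoop sign rest

def monotone (seq : List Int) : Bool :=
  if seq.length ≤ 1 then true
  else
    let diffs := (seq.zip (seq.drop 1)).map (fun p => p.2 - p.1)
    monotoneLoop 0 diffs

-- ===== PORT B =====
def monotone_alt (seq : List Int) : Bool :=
  let pairs := seq.zip (seq.drop 1)
  pairs.all (fun p => decide (p.1 ≤ p.2)) || pairs.all (fun p => decide (p.2 ≤ p.1))

-- ===== PRECONDITION & SPEC =====
def Spec_monotone (seq : List Int) (out : Bool) : Prop := out = monotone_alt seq
instance (seq : List Int) (out : Bool) : Decidable (Spec_monotone seq out) := by unfold Spec_monotone; infer_instance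

-- ===== CLAIM (what is proved, stated in full; the proofs are below) =====
def Claim_equal_monotone : Prop := ∀ (seq : List Int), Dom_monotone seq → Spec_monotone seq (monotone seq)

-- ===== LEMMAS AND PROOFS =====
theorem monotoneLoop_one (ds : List Int) :
    monotoneLoop 1 ds = ds.all (fun d => decide (0 ≤ d)) := by
  induction ds with
  | nil => rfl
  | cons d rest ih =>
    by_cases h0 : d = 0
    · subst h0; simpa [monotoneLoop] using ih
    · by_cases hneg : d < 0
      · have : ¬ (0 ≤ d) := by omega
        simp [monotoneLoop, h0, this, show (1:Int) * d < 0 by omega]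
      · have h1 : (0:Int) ≤ d := by omega
        simp [monotoneLoop, h0, h1, show ¬ ((1:Int) * d < 0) by omega, ih]

theorem monotoneLoop_neg_one (ds : List Int) :
    monotoneLoop (-1) ds = ds.all (fun d => decide (d ≤ 0)) := by
  induction ds with
  | nil => rfl
  | cons d rest ih =>
    by_cases h0 : d = 0
    · subst h0; simpa [monotoneLoop] using ih
    · by_cases hpos : 0 < d
      · have : ¬ (d ≤ 0) := by omega
        simp [monotoneLoop, h0, this, show (-1:Int) * d < 0 by omega]
      · have h1 : d ≤ (0:Int) := by omega
        simp [monotoneLoop, h0, h1, show ¬ ((-1:Int) * d < 0) by omega, ih]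

theorem monotoneLoop_zero (ds : List Int) :
    monotoneLoop 0 ds
      = (ds.all (fun d => decide (0 ≤ d)) || ds.all (fun d => decide (d ≤ 0))) := by
  induction ds with
  | nil => rfl
  | cons d rest ih =>
    by_cases h0 : d = 0
    · subst h0; simpa [monotoneLoop] using ih
    · by_cases hpos : 0 < d
      · have h1 : (0:Int) ≤ d := by omega
        have h2 : ¬ (d ≤ 0) := by omega
        simp [monotoneLoop, h0, hpos, h1, h2, monotoneLoop_one]
      · have h1 : ¬ ((0:Int) ≤ d) := by omega
        have h2 : d ≤ (0:Int) := by omega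
        simp [monotoneLoop, h0, hpos, h1, h2, monotoneLoop_neg_one]

-- ===== VERDICT (by name: the statement is the Claim_ definition above) =====
theorem monotone_spec : Claim_equal_monotone := by
  intro seq _
  unfold Spec_monotone monotone monotone_alt
  split_ifs with h
  · match seq, h with
    | [], _ => rfl
    | [x], _ => rfl
  · rw [monotoneLoop_zero, List.all_map, List.all_map]
    have e1 : (fun p : Int × Int => decide (0 ≤ p.2 - p.1)) = (fun p : Int × Int => decide (p.1 ≤ p.2)) := by
      funext p; simp only [decide_eq_decide]; omega
    have e2 : (fun p : Int × Int => decide (p.2 - p.1 ≤ 0)) = (fun p : Int × Int => decide (p.2 ≤ p.1)) := by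
      funext p; simp only [decide_eq_decide]; omega
    simp only [Function.comp_def, e1, e2]
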